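-- pv_equiv track=rewrite | github.com/KondratkovArt/Log_Parser_Py | LogParser.py | mask_to_regex
-- ===== SOURCE A (Python) =====
-- def mask_to_regex(mask):
--     res = mask
--     arr = ["\\", "#", "|", "(", ")", "[", "]", "{", "}", "^", "$", "+", "."]
--     for i in range(len(arr)):
--         res = str.replace(res, arr[i], "\\" + arr[i])
--     res = str.replace(res, "*", ".*")
--     res = str.replace(res, "?", ".")
--     return "^" + res + "$"
-- ===== SOURCE B (Python) =====
-- def mask_to_regex(mask):
--     out = []
--     for c in mask:
--         if c in "\\#|()[]{}^$+.":
--             out.append("\\" + c)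
--         elif c == "*":
--             out.append(".*")
--         elif c == "?":
--             out.append(".")
--         else:
--             out.append(c)
--     return "^" + "".join(out) + "$"
-- ===== Notes on version B (the rewrite author's own statement) =====
-- stated objective: simpler
-- what changed: Replaced A's 15 sequential whole-string str.replace passes with one character-by-character pass that emits the escaped/translated piece for each character and joins them.
import Mathlib
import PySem

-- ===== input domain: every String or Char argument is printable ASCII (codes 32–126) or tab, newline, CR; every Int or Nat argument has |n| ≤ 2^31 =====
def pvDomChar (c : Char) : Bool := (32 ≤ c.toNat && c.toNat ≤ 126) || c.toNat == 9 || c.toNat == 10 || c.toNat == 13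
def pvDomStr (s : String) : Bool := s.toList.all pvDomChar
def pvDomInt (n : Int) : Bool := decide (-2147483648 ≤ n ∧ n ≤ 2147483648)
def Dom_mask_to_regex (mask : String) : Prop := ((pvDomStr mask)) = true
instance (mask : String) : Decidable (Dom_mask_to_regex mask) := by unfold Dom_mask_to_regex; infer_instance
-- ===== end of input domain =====

-- B replaces A's 15 sequential str.replace passes with one character-by-character pass
-- (objective: simpler — one loop, one membership test, same return value).

-- ===== PORT A =====
def pvArrA : List String := ["\\", "#", "|", "(", ")", "[", "]", "{", "}", "^", "$", "+", "."]

def mask_to_regex (mask : String) : String :=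
  let res := (PySem.List.pyRange 0 (PySem.List.len pvArrA) 1).foldl
    (fun res i =>
      PySem.Str.replace res (PySem.List.pyGetD pvArrA i "")
        ("\\" ++ PySem.List.pyGetD pvArrA i "")) mask
  let res := PySem.Str.replace res "*" ".*"
  let res := PySem.Str.replace res "?" "."
  "^" ++ res ++ "$"

-- ===== PORT B =====
def pvSpecials : List Char := ['\\', '#', '|', '(', ')', '[', ']', '{', '}', '^', '$', '+', '.']

def pvEsc (c : Char) : List Char :=
  if c ∈ pvSpecials then ['\\', c]
  else if c = '*' then ['.', '*']
  else if c = '?' then ['.']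
  else [c]

def mask_to_regex_alt (mask : String) : String :=
  "^" ++ String.ofList (mask.toList.foldl (fun acc c => acc ++ pvEsc c) []) ++ "$"

-- ===== PRECONDITION & SPEC =====
def Spec_mask_to_regex (mask : String) (out : String) : Prop := out = mask_to_regex_alt mask
instance (mask : String) (out : String) : Decidable (Spec_mask_to_regex mask out) := by unfold Spec_mask_to_regex; infer_instance

-- ===== CLAIM (what is proved, stated in full; the proofs are below) =====
def Claim_equal_mask_to_regex : Prop := ∀ (mask : String), Dom_mask_to_regex mask → Spec_mask_to_regex mask (mask_to_regex mask)

-- ===== LEMMAS AND PROOFS =====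

-- Chars.replace with a single-character pattern is a flatMap over the characters.
theorem pv_go_single (a : Char) (r : List Char) :
    ∀ (l acc : List Char) (fuel : Nat), l.length ≤ fuel →
      PySem.Chars.replace.go [a] r fuel l acc
        = acc.reverse ++ l.flatMap (fun c => if c = a then r else [c]) := by
  intro l
  induction l with
  | nil => intro acc fuel _; cases fuel <;> simp [PySem.Chars.replace.go]
  | cons c t ih =>
    intro acc fuel hf
    cases fuel with
    | zero => simp at hf
    | succ n =>
      simp only [PySem.Chars.replace.go]
      by_cases h : c = a
      · subst h
        simp [List.isPrefixOf, ih _ n (by simpa using hf)]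
      · have hp : List.isPrefixOf [a] (c :: t) = false := by
          simp [List.isPrefixOf]; exact fun e => (h e.symm).elim
        simp [hp, ih _ n (by simpa using hf), h]

theorem pv_replace_single (s : List Char) (a : Char) (r : List Char) :
    PySem.Chars.replace s [a] r = s.flatMap (fun c => if c = a then r else [c]) := by
  simp [PySem.Chars.replace]
  simpa using pv_go_single a r s [] s.length (le_refl _)

theorem mask_to_regex_toList (mask : String) :
    (mask_to_regex mask).toList
      = '^' :: mask.toList.flatMap pvEsc ++ ['$'] := by
  have hr : PySem.List.pyRange 0 (PySem.List.len pvArrA) 1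
      = [0, 1, 2, 3, 4, 5, 6, 7, 8, 9, 10, 11, 12] := by decide
  unfold mask_to_regex
  rw [hr]
  simp only [List.foldl]
  have e0 : PySem.List.pyGetD pvArrA 0 "" = "\\" := by decide
  have e1 : PySem.List.pyGetD pvArrA 1 "" = "#" := by decide
  have e2 : PySem.List.pyGetD pvArrA 2 "" = "|" := by decide
  have e3 : PySem.List.pyGetD pvArrA 3 "" = "(" := by decide
  have e4 : PySem.List.pyGetD pvArrA 4 "" = ")" := by decide
  have e5 : PySem.List.pyGetD pvArrA 5 "" = "[" := by decide
  have e6 : PySem.List.pyGetD pvArrA 6 "" = "]" := by decide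
  have e7 : PySem.List.pyGetD pvArrA 7 "" = "{" := by decide
  have e8 : PySem.List.pyGetD pvArrA 8 "" = "}" := by decide
  have e9 : PySem.List.pyGetD pvArrA 9 "" = "^" := by decide
  have e10 : PySem.List.pyGetD pvArrA 10 "" = "$" := by decide
  have e11 : PySem.List.pyGetD pvArrA 11 "" = "+" := by decide
  have e12 : PySem.List.pyGetD pvArrA 12 "" = "." := by decide
  rw [e0, e1, e2, e3, e4, e5, e6, e7, e8, e9, e10, e11, e12]
  simp only [String.toList_append, PySem.Str.toList_replace]
  have t0 : ("\\" : String).toList = ['\\'] := rfl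
  have t1 : ("#" : String).toList = ['#'] := rfl
  have t2 : ("|" : String).toList = ['|'] := rfl
  have t3 : ("(" : String).toList = ['('] := rfl
  have t4 : (")" : String).toList = [')'] := rfl
  have t5 : ("[" : String).toList = ['['] := rfl
  have t6 : ("]" : String).toList = [']'] := rfl
  have t7 : ("{" : String).toList = ['{'] := rfl
  have t8 : ("}" : String).toList = ['}'] := rfl
  have t9 : ("^" : String).toList = ['^'] := rfl
  have t10 : ("$" : String).toList = ['$'] := rfl
  have t11 : ("+" : String).toList = ['+'] := rfl
  have t12 : ("." : String).toList = ['.'] := rfl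
  have t13 : ("*" : String).toList = ['*'] := rfl
  have t14 : ("?" : String).toList = ['?'] := rfl
  have t15 : (".*" : String).toList = ['.', '*'] := rfl
  rw [t0, t1, t2, t3, t4, t5, t6, t7, t8, t9, t10, t11, t12, t13, t14, t15]
  simp only [pv_replace_single, List.flatMap_assoc]
  simp only [List.cons_append, List.nil_append]
  congr 1
  congr 1
  apply List.flatMap_congr
  intro c _
  by_cases hc : c ∈ pvSpecials
  · fin_cases hc <;> rfl
  · simp only [pvSpecials, List.mem_cons, List.not_mem_nil, or_false] at hc
    push Not at hc
    obtain ⟨h1, h2, h3, h4, h5, h6, h7, h8, h9, h10, h11, h12, h13⟩ := hc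
    by_cases hs : c = '*'
    · subst hs; simp [pvEsc, pvSpecials]
    · by_cases hq : c = '?'
      · subst hq; simp [pvEsc, pvSpecials]
      · simp [pvEsc, pvSpecials, h1, h2, h3, h4, h5, h6, h7, h8, h9, h10, h11, h12, h13, hs, hq]

-- ===== VERDICT (by name: the statement is the Claim_ definition above) =====
theorem mask_to_regex_spec : Claim_equal_mask_to_regex := by
  intro mask _
  unfold Spec_mask_to_regex
  apply String.toList_inj.mp
  rw [mask_to_regex_toList]
  unfold mask_to_regex_alt
  rw [PySem.List.foldl_append_eq_flatMap]
  simp [String.toList_append]
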